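-- pv_equiv track=rewrite | github.com/FixerLT/labs | discrete math/lab_2.py | get_sorted_connections_to_next
-- ===== SOURCE A (Python) =====
-- def get_sorted_connections_to_next(my_ar):
--     good = {}
--     sorted_ar = sorted(my_ar)
--     for i in range(len(my_ar)):
--         good[sorted_ar[i]] = sorted_ar[(i+1)%len(my_ar)]
--     res = []
--     for e in my_ar:
--         res.append([])
--         for e2 in my_ar:
--             if e2 == good[e]:
--                 res[-1].append(True)
--             else:
--                 res[-1].append(False)
--     return res
-- ===== SOURCE B (Python) =====
-- def get_sorted_connections_to_next(my_ar):
--     n = len(my_ar)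
--     good = {}
--     sorted_ar = sorted(my_ar)
--     for i in range(n):
--         good[sorted_ar[i]] = sorted_ar[(i + 1) % n]
--     positions = {}
--     for j, v in enumerate(my_ar):
--         positions[v] = positions.get(v, []) + [j]
--     res = []
--     for e in my_ar:
--         row = [False] * n
--         for j in positions.get(good[e], []):
--             row[j] = True
--         res.append(row)
--     return res
-- ===== Notes on version B (the rewrite author's own statement) =====
-- stated objective: alternative
-- what changed: B replaces A's inner scan comparing every element of my_ar against the successor for every row by a one-pass inverted index value->column positions built once, then scatters True into fresh all-False rows at those positions (bulk [False]*n allocation plus one write per matching column).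
import Mathlib
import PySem

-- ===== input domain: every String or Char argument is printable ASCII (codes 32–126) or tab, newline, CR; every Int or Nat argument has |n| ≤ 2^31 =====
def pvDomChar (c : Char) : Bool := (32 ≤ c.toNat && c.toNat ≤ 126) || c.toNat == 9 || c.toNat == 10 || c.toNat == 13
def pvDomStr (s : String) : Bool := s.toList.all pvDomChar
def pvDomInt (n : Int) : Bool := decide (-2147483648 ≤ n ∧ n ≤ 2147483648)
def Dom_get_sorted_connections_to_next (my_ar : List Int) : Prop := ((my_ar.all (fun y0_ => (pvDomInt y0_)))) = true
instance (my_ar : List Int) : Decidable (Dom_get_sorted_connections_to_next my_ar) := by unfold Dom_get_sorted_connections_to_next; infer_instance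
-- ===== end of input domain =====

-- B builds an inverted index value -> column positions once and scatters True into fresh
-- all-False rows, instead of A's inner scan per row; same result, alternative structure.

-- ===== PORT A =====
-- good[e] lookup: e ∈ my_ar and good's keys are exactly my_ar's elements, so the lookup
-- never raises KeyError; getD with an arbitrary default is exact here.
def pvGood (my_ar : List Int) : PySem.Dict Int Int :=
  let sorted_ar := PySem.List.sorted my_ar (fun x => x) false
  (PySem.List.pyRange 0 (my_ar.length : Int) 1).foldl
    (fun d i => d.insert (PySem.List.pyGetD sorted_ar i 0)
                         (PySem.List.pyGetD sorted_ar (PySem.Int.mod (i + 1) (my_ar.length : Int)) 0))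
    PySem.Dict.empty

def get_sorted_connections_to_next (my_ar : List Int) : List (List Bool) :=
  let good := pvGood my_ar
  my_ar.foldl (fun res e =>
    res ++ [my_ar.foldl (fun row e2 =>
      row ++ [if e2 == good.getD e 0 then true else false]) []]) []

-- ===== PORT B =====
-- 'for j, v in enumerate(my_ar): positions[v] = positions.get(v, []) + [j]'
def pvPositions (my_ar : List Int) : PySem.Dict Int (List Int) :=
  ((PySem.List.enumerate my_ar 0).map (fun p => (p.2, p.1))).foldl
    (fun d p => d.modify p.1 [] (· ++ [p.2])) PySem.Dict.empty

-- row[j] = True; every stored j is a valid nonnegative index, so pySetD is exact.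
def get_sorted_connections_to_next_alt (my_ar : List Int) : List (List Bool) :=
  let good := pvGood my_ar
  let positions := pvPositions my_ar
  my_ar.foldl (fun res e =>
    res ++ [(positions.getD (good.getD e 0) []).foldl
      (fun row j => PySem.List.pySetD row j true) (List.replicate my_ar.length false)]) []

-- ===== PRECONDITION & SPEC =====
def Spec_get_sorted_connections_to_next (my_ar : List Int) (out : List (List Bool)) : Prop := out = get_sorted_connections_to_next_alt my_ar
instance (my_ar : List Int) (out : List (List Bool)) : Decidable (Spec_get_sorted_connections_to_next my_ar out) := by unfold Spec_get_sorted_connections_to_next; infer_instance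

-- ===== CLAIM (what is proved, stated in full; the proofs are below) =====
def Claim_equal_get_sorted_connections_to_next : Prop := ∀ (my_ar : List Int), Dom_get_sorted_connections_to_next my_ar → Spec_get_sorted_connections_to_next my_ar (get_sorted_connections_to_next my_ar)

-- ===== LEMMAS AND PROOFS =====

-- positions.get(t, []) is exactly the increasing list of columns j with my_ar[j] == t
theorem pvPositions_getD (my_ar : List Int) (t : Int) :
    (pvPositions my_ar).getD t []
      = (((PySem.List.enumerate my_ar 0).map (fun p => (p.2, p.1))).filter
          (fun p => p.1 == t)).map (·.2) := by
  unfold pvPositions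
  rw [PySem.Dict.getD_foldl_modify_append]
  simp

theorem scatter_length (S : List Int) (r : List Bool) :
    (S.foldl (fun row j => PySem.List.pySetD row j true) r).length = r.length := by
  induction S generalizing r with
  | nil => rfl
  | cons j S ih => simp [List.foldl_cons, ih, PySem.List.length_pySetD]

theorem scatter_getElem? (S : List Int) (hS : ∀ j ∈ S, 0 ≤ j) (r : List Bool) (i : Nat)
    (hi : i < r.length) :
    (S.foldl (fun row j => PySem.List.pySetD row j true) r)[i]?
      = some (decide ((i : Int) ∈ S) || r[i]) := by
  induction S generalizing r with
  | nil => simp [List.getElem?_eq_getElem hi]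
  | cons j S ih =>
    have hj : 0 ≤ j := hS j (by simp)
    have hlen : (PySem.List.pySetD r j true).length = r.length := PySem.List.length_pySetD ..
    rw [List.foldl_cons, ih (fun x hx => hS x (by simp [hx])) _ (by rw [hlen]; exact hi)]
    simp only [PySem.List.pySetD_of_nonneg (h := hj), List.getElem_set]
    by_cases hij : (i : Int) = j
    · have h1 : j.toNat = i := by omega
      simp [h1, hij]
    · have h1 : j.toNat ≠ i := by omega
      simp [h1, hij]

-- the scattered row equals A's elementwise-compared row, for ANY target t
theorem row_eq (l : List Int) (t : Int) :
    ((pvPositions l).getD t []).foldl (fun row j => PySem.List.pySetD row j true)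
        (List.replicate l.length false)
      = l.foldl (fun row e2 => row ++ [if e2 == t then true else false]) [] := by
  rw [PySem.List.foldl_append_singleton_eq_map, pvPositions_getD]
  set S := (((PySem.List.enumerate l 0).map (fun p => (p.2, p.1))).filter
          (fun p => p.1 == t)).map (·.2) with hSdef
  have hmem : ∀ x : Int, x ∈ S ↔ ∃ (k : Nat) (h : k < l.length), x = k ∧ l[k] = t := by
    intro x
    simp only [hSdef, List.mem_map, List.mem_filter, PySem.List.mem_enumerate_iff]
    constructor
    · rintro ⟨p, ⟨⟨q, ⟨⟨k, hk, rfl⟩, rfl⟩⟩, hpt⟩, rfl⟩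
      exact ⟨k, hk, by simp, by simpa using hpt⟩
    · rintro ⟨k, hk, rfl, hlk⟩
      exact ⟨(t, (k : Int)), ⟨⟨((k : Int), t), ⟨⟨k, hk, by simp [hlk]⟩, rfl⟩⟩, by simp⟩, rfl⟩
  have hnn : ∀ j ∈ S, 0 ≤ j := by
    intro j hj
    obtain ⟨k, _, rfl, _⟩ := (hmem j).1 hj
    exact Int.natCast_nonneg k
  apply List.ext_getElem?
  intro i
  by_cases hil : i < l.length
  · rw [scatter_getElem? S hnn _ i (by simpa using hil),
        List.getElem?_eq_getElem (by simpa using hil)]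
    have hiff : ((i : Int) ∈ S) ↔ l[i] = t := by
      rw [hmem]
      constructor
      · rintro ⟨k, hk, hik, hlk⟩
        have hki : k = i := by exact_mod_cast hik.symm
        subst hki; exact hlk
      · intro h; exact ⟨i, hil, rfl, h⟩
    simp [hiff, List.getElem_replicate]
  · rw [List.getElem?_eq_none, List.getElem?_eq_none]
    · simpa using hil
    · rw [scatter_length]; simpa using hil

-- ===== VERDICT (by name: the statement is the Claim_ definition above) =====
theorem get_sorted_connections_to_next_spec : Claim_equal_get_sorted_connections_to_next := by
  intro my_ar _
  unfold Spec_get_sorted_connections_to_next get_sorted_connections_to_next get_sorted_connections_to_next_alt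
  simp only []
  congr 1
  funext res e
  congr 1
  exact congrArg (fun r => [r]) (row_eq my_ar ((pvGood my_ar).getD e 0)).symm
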